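-- pv_equiv track=rewrite | github.com/Saper37/Showcase | common files/eulotfunc.py | findpairflajs
-- ===== SOURCE A (Python) =====
-- from itertools import permutations
--
-- def findpairflajs( rows, r ):
-- 	col = {}
-- 	for x in range( len( rows ) ):
-- 		row = rows[ x ]
-- 		for pair in list( permutations( row, r ) ):
-- 			ok = col.get( pair )
-- 			if ok == None:
-- 				col[ pair ] = x
-- 	return col
-- ===== SOURCE B (Python) =====
-- from itertools import permutations
--
-- def findpairflajs(rows, r):
--     if not rows:
--         return {}
--     rest = findpairflajs(rows[1:], r)
--     out = dict.fromkeys(permutations(rows[0], r), 0)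
--     for pair, x in rest.items():
--         out.setdefault(pair, x + 1)
--     return out
-- ===== Notes on version B (the rewrite author's own statement) =====
-- stated objective: alternative
-- what changed: B is recursive on the rows list: it solves the tail, shifts the tail's row indices by +1, and merges that subresult under a dict.fromkeys head built from the first row via setdefault, instead of A's single forward pass over indices with a guarded dict insert.
import Mathlib
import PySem

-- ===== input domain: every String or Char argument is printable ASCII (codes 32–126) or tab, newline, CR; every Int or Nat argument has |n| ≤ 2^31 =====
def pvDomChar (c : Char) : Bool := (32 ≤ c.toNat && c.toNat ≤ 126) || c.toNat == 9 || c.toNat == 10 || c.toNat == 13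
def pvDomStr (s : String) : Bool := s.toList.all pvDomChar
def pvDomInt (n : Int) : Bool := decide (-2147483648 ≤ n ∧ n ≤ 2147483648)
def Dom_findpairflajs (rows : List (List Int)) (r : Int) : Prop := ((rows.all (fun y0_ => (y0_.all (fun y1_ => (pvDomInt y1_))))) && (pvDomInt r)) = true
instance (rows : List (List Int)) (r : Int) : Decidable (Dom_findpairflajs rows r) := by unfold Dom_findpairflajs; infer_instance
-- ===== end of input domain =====

-- B recurses on the rows list: solve the tail, shift its indices by +1, and merge it
-- under a dict.fromkeys head built from the first row; objective: alternative (same cost).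

-- ===== PORT A =====
-- for x in range(len(rows)): row = rows[x]; for pair in permutations(row, r): ok = col.get(pair); if ok == None: col[pair] = x
-- rows[x] ported as pyGetD (x is always in range here, exact); r.toNat is exact under Pre_ (0 ≤ r when the loop body runs).
def findpairflajs (rows : List (List Int)) (r : Int) : List (List Int × Int) :=
  ((PySem.List.pyRange 0 rows.length 1).foldl
    (fun col x =>
      let row := PySem.List.pyGetD rows x []
      (PySem.List.permutations row r.toNat).foldl
        (fun col pair =>
          let ok := col.get? pair
          if ok = none then col.insert pair x else col)
        col)
    PySem.Dict.empty).items

-- ===== PORT B =====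
-- if not rows: return {};  rest = findpairflajs(rows[1:], r);
-- out = dict.fromkeys(permutations(rows[0], r), 0);  for pair, x in rest.items(): out.setdefault(pair, x + 1);  return out
-- dict.fromkeys(ks, 0) is ported as PySem.Dict.ofList over the keys paired with 0 (same dict); r.toNat is exact under Pre_.
def findpairflajs_alt (rows : List (List Int)) (r : Int) : List (List Int × Int) :=
  match rows with
  | [] => []
  | row :: rest =>
      let restI := findpairflajs_alt rest r
      let out := PySem.Dict.ofList ((PySem.List.permutations row r.toNat).map (fun pair => (pair, (0 : Int))))
      (restI.foldl (fun out pr => out.setdefault pr.1 (pr.2 + 1)) out).items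

-- ===== PRECONDITION & SPEC =====
-- Pre_ excludes only nonempty rows with r < 0, where Python A raises ValueError (itertools.permutations).
def Pre_findpairflajs (rows : List (List Int)) (r : Int) : Prop := rows = [] ∨ 0 ≤ r
instance (rows : List (List Int)) (r : Int) : Decidable (Pre_findpairflajs rows r) := by unfold Pre_findpairflajs; infer_instance
def pvWitness_findpairflajs : List (List Int) × Int := ([[1, 2], [2, 1], [3]], 2)

def Spec_findpairflajs (rows : List (List Int)) (r : Int) (out : List (List Int × Int)) : Prop := out = findpairflajs_alt rows r
instance (rows : List (List Int)) (r : Int) (out : List (List Int × Int)) : Decidable (Spec_findpairflajs rows r out) := by unfold Spec_findpairflajs; infer_instance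

-- ===== CLAIM (what is proved, stated in full; the proofs are below) =====
def Claim_equal_findpairflajs : Prop := ∀ (rows : List (List Int)) (r : Int), Dom_findpairflajs rows r → Pre_findpairflajs rows r → Spec_findpairflajs rows r (findpairflajs rows r)

-- ===== LEMMAS AND PROOFS =====

-- A's insert-if-absent dict step
def pvStep (d : PySem.Dict (List Int) Int) (pr : List Int × Int) : PySem.Dict (List Int) Int :=
  if d.get? pr.1 = none then d.insert pr.1 pr.2 else d

-- first-occurrence filter of a (key, value) stream against a seen-key list
def pvF : List (List Int × Int) → List (List Int) → List (List Int × Int)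
  | [], _ => []
  | pr :: t, seen => if pr.1 ∈ seen then pvF t seen else pr :: pvF t (pr.1 :: seen)

-- the common (pair, row-index) stream
def pvStream (rows : List (List Int)) (r : Int) : List (List Int × Int) :=
  (List.range rows.length).flatMap (fun k =>
    (PySem.List.permutations (rows.getD k []) r.toNat).map (fun p => (p, (k : Int))))

theorem pvF_congr : ∀ (s : List (List Int × Int)) (L L' : List (List Int)),
    (∀ k, k ∈ L ↔ k ∈ L') → pvF s L = pvF s L' := by
  intro s
  induction s with
  | nil => intro L L' _; rfl
  | cons pr t ih =>
      intro L L' h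
      simp only [pvF]
      by_cases hm : pr.1 ∈ L
      · rw [if_pos hm, if_pos ((h pr.1).1 hm), ih L L' h]
      · rw [if_neg hm, if_neg (fun hx => hm ((h pr.1).2 hx))]
        rw [ih (pr.1 :: L) (pr.1 :: L') (by intro k; simp [h k])]
theorem pvF_append : ∀ (s1 s2 : List (List Int × Int)) (L : List (List Int)),
    pvF (s1 ++ s2) L = pvF s1 L ++ pvF s2 ((pvF s1 L).map Prod.fst ++ L) := by
  intro s1
  induction s1 with
  | nil => intro s2 L; simp [pvF]
  | cons pr t ih =>
      intro s2 L
      simp only [List.cons_append, pvF]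
      by_cases hm : pr.1 ∈ L
      · rw [if_pos hm, if_pos hm, ih]
      · rw [if_neg hm, if_neg hm, ih]
        rw [pvF_congr s2 ((pvF t (pr.1 :: L)).map Prod.fst ++ pr.1 :: L)
          (pr.1 :: ((pvF t (pr.1 :: L)).map Prod.fst ++ L))
          (by intro k; simp only [List.mem_append, List.mem_cons]; tauto)]
        simp
theorem pvF_dedup : ∀ (s : List (List Int × Int)) (L K : List (List Int)),
    (∀ k ∈ L, k ∈ K) → pvF (pvF s L) K = pvF s K := by
  intro s
  induction s with
  | nil => intro L K _; rfl
  | cons pr t ih =>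
      intro L K h
      simp only [pvF]
      by_cases hm : pr.1 ∈ L
      · rw [if_pos hm, if_pos (h pr.1 hm), ih L K h]
      · rw [if_neg hm]
        simp only [pvF]
        by_cases hk : pr.1 ∈ K
        · rw [if_pos hk, if_pos hk]
          exact ih (pr.1 :: L) K
            (fun k hkk => (List.mem_cons.1 hkk).elim (fun h1 => h1 ▸ hk) (h k))
        · rw [if_neg hk, if_neg hk]
          congr 1
          exact ih (pr.1 :: L) (pr.1 :: K)
            (fun k hkk => (List.mem_cons.1 hkk).elim
              (fun h1 => h1 ▸ List.mem_cons_self ..)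
              (fun h1 => List.mem_cons_of_mem _ (h k h1)))
theorem pvF_map (g : Int → Int) : ∀ (s : List (List Int × Int)) (L : List (List Int)),
    pvF (s.map (fun pr => (pr.1, g pr.2))) L = (pvF s L).map (fun pr => (pr.1, g pr.2)) := by
  intro s
  induction s with
  | nil => intro L; rfl
  | cons pr t ih =>
      intro L
      simp only [List.map_cons, pvF]
      by_cases hm : pr.1 ∈ L
      · rw [if_pos hm, if_pos hm, ih]
      · rw [if_neg hm, if_neg hm, List.map_cons, ih]
theorem pvFold_step : ∀ (s : List (List Int × Int)) (d : PySem.Dict (List Int) Int),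
    d.keys.Nodup → (s.foldl pvStep d).items = d.items ++ pvF s d.keys := by
  intro s
  induction s with
  | nil => intro d _; simp [pvF]
  | cons pr t ih =>
      intro d hnd
      simp only [List.foldl_cons, pvF]
      by_cases hc : d.contains pr.1 = true
      · have hmem : pr.1 ∈ d.keys := (PySem.Dict.contains_iff_mem_keys _ _).1 hc
        have hget : ¬ d.get? pr.1 = none := by
          rw [PySem.Dict.contains_eq_isSome_get?] at hc
          cases hg : d.get? pr.1 <;> simp [hg] at hc ⊢
        rw [if_pos hmem]
        have hstep : pvStep d pr = d := by unfold pvStep; rw [if_neg hget]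
        rw [hstep]
        exact ih d hnd
      · have hc' : d.contains pr.1 = false := by simpa using hc
        have hmem : pr.1 ∉ d.keys := fun hm => hc ((PySem.Dict.contains_iff_mem_keys _ _).2 hm)
        have hget : d.get? pr.1 = none := by
          rw [PySem.Dict.contains_eq_isSome_get?] at hc'
          cases hg : d.get? pr.1 <;> simp [hg] at hc' ⊢
        rw [if_neg hmem]
        have hstep : pvStep d pr = d.insert pr.1 pr.2 := by unfold pvStep; rw [if_pos hget]
        rw [hstep]
        rw [ih _ (PySem.Dict.nodup_keys_insert _ _ _ hnd)]
        rw [PySem.Dict.items_insert_of_not_contains _ _ hc',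
            PySem.Dict.keys_insert_of_not_contains _ _ hc']
        rw [pvF_congr t (d.keys ++ [pr.1]) (pr.1 :: d.keys)
          (by intro k; simp only [List.mem_append, List.mem_cons]; tauto)]
        simp
theorem pvOfListZero : ∀ (ks : List (List Int × Int)) (d : PySem.Dict (List Int) Int),
    d.keys.Nodup → (∀ p ∈ d.items, p.2 = (0 : Int)) → (∀ p ∈ ks, p.2 = (0 : Int)) →
    (ks.foldl (fun d p => d.insert p.1 p.2) d).items = d.items ++ pvF ks d.keys := by
  intro ks
  induction ks with
  | nil => intro d _ _ _; simp [pvF]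
  | cons p t ih =>
      intro d hnd hd0 hk0
      have hp0 : p.2 = 0 := hk0 p (List.mem_cons_self ..)
      simp only [List.foldl_cons, pvF]
      by_cases hc : d.contains p.1 = true
      · have hmem : p.1 ∈ d.keys := (PySem.Dict.contains_iff_mem_keys _ _).1 hc
        have heq : d.insert p.1 p.2 = d := by
          apply PySem.Dict.ext
          rw [PySem.Dict.items_insert_of_contains _ _ hc]
          have : d.items = d.items.map id := by simp
          conv_rhs => rw [this]
          apply List.map_congr_left
          intro q hq
          simp only [id]
          by_cases hb : (q.1 == p.1) = true
          · rw [if_pos hb]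
            have : q = (q.1, q.2) := rfl
            rw [this, hd0 q hq, hp0, eq_of_beq hb]
          · rw [if_neg hb]
        rw [if_pos hmem, heq, ih d hnd hd0 (fun q hq => hk0 q (List.mem_cons_of_mem _ hq))]
      · have hc' : d.contains p.1 = false := by simpa using hc
        have hmem : p.1 ∉ d.keys := fun hm => hc ((PySem.Dict.contains_iff_mem_keys _ _).2 hm)
        rw [if_neg hmem]
        rw [ih _ (PySem.Dict.nodup_keys_insert _ _ _ hnd)
          (by intro q hq
              rw [PySem.Dict.items_insert_of_not_contains _ _ hc'] at hq
              rcases List.mem_append.1 hq with h1 | h1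
              · exact hd0 q h1
              · simpa using (List.mem_singleton.1 h1) ▸ hp0)
          (fun q hq => hk0 q (List.mem_cons_of_mem _ hq))]
        rw [PySem.Dict.items_insert_of_not_contains _ _ hc',
            PySem.Dict.keys_insert_of_not_contains _ _ hc']
        rw [pvF_congr t (d.keys ++ [p.1]) (p.1 :: d.keys)
          (by intro k; simp only [List.mem_append, List.mem_cons]; tauto)]
        simp
theorem pvSetdefault_step (d : PySem.Dict (List Int) Int) (k : List Int) (v : Int) :
    d.setdefault k v = pvStep d (k, v) := by
  by_cases h : d.contains k = true
  · rw [PySem.Dict.setdefault_of_contains _ _ h]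
    unfold pvStep
    rw [if_neg]
    rw [PySem.Dict.contains_eq_isSome_get?] at h
    cases hg : d.get? k <;> simp [hg] at h ⊢
  · have h' : d.contains k = false := by simpa using h
    rw [PySem.Dict.setdefault_of_not_contains _ _ h']
    unfold pvStep
    rw [if_pos]
    rw [PySem.Dict.contains_eq_isSome_get?] at h'
    cases hg : d.get? k <;> simp [hg] at h' ⊢
theorem pvStream_cons (row : List Int) (rest : List (List Int)) (r : Int) :
    pvStream (row :: rest) r
      = (PySem.List.permutations row r.toNat).map (fun p => (p, (0 : Int)))
        ++ (pvStream rest r).map (fun pr => (pr.1, pr.2 + 1)) := by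
  unfold pvStream
  simp only [List.length_cons, List.range_succ_eq_map, List.flatMap_cons, List.flatMap_map,
    List.map_flatMap]
  congr 1
  congr 1
  funext a
  simp [Function.comp]
theorem pvA_eq (rows : List (List Int)) (r : Int) :
    findpairflajs rows r = pvF (pvStream rows r) [] := by
  unfold findpairflajs
  have hA : (PySem.List.pyRange 0 rows.length 1).foldl
      (fun col x =>
        let row := PySem.List.pyGetD rows x []
        (PySem.List.permutations row r.toNat).foldl
          (fun col pair =>
            let ok := col.get? pair
            if ok = none then col.insert pair x else col) col)
      PySem.Dict.empty
      = (pvStream rows r).foldl pvStep PySem.Dict.empty := by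
    unfold pvStream
    rw [List.foldl_flatMap, PySem.List.pyRange_one]
    simp only [sub_zero, Int.toNat_natCast, List.foldl_map]
    apply PySem.List.foldl_congr_mem
    intro col k _
    simp only [PySem.List.pyGetD_natCast, zero_add]
    rfl
  rw [hA, pvFold_step _ _ PySem.Dict.nodup_keys_empty]
  rfl
theorem pvB_eq (r : Int) : ∀ (rows : List (List Int)),
    findpairflajs_alt rows r = pvF (pvStream rows r) [] := by
  intro rows
  induction rows with
  | nil => rfl
  | cons row rest ih =>
      show ((findpairflajs_alt rest r).foldl
          (fun out pr => out.setdefault pr.1 (pr.2 + 1))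
          (PySem.Dict.ofList ((PySem.List.permutations row r.toNat).map
            (fun pair => (pair, (0 : Int)))))).items = _
      set s0 := (PySem.List.permutations row r.toNat).map (fun pair => (pair, (0 : Int))) with hs0
      set out0 := PySem.Dict.ofList s0 with hout0
      have hofl : out0 = s0.foldl (fun d p => d.insert p.1 p.2) PySem.Dict.empty := rfl
      have hitems : out0.items = pvF s0 [] := by
        rw [hofl, pvOfListZero s0 PySem.Dict.empty PySem.Dict.nodup_keys_empty
          (by intro p hp; simp [PySem.Dict.empty] at hp)
          (by intro p hp; rw [hs0] at hp; rcases List.mem_map.1 hp with ⟨q, _, hq⟩; rw [← hq])]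
        rfl
      have hkeys : out0.keys = (pvF s0 []).map Prod.fst := by
        show out0.items.map Prod.fst = _
        rw [hitems]
      have hnd : out0.keys.Nodup := by
        rw [hofl]
        exact PySem.Dict.nodup_keys_foldl_insert_key s0 Prod.fst (fun _ p => p.2)
          PySem.Dict.empty PySem.Dict.nodup_keys_empty
      rw [ih]
      rw [PySem.List.foldl_congr_mem _ _ (fun out pr => pvStep out (pr.1, pr.2 + 1)) _
        (fun out pr _ => pvSetdefault_step out pr.1 (pr.2 + 1))]
      rw [show (pvF (pvStream rest r) []).foldl (fun out pr => pvStep out (pr.1, pr.2 + 1)) out0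
            = ((pvF (pvStream rest r) []).map (fun pr => (pr.1, pr.2 + 1))).foldl pvStep out0
          from (List.foldl_map (f := fun pr : List Int × Int => (pr.1, pr.2 + 1))
            (g := pvStep) (l := pvF (pvStream rest r) []) (init := out0)).symm]
      rw [pvFold_step _ _ hnd]
      rw [pvStream_cons, pvF_append, hitems, hkeys]
      congr 1
      rw [pvF_map (fun v => v + 1) (pvF (pvStream rest r) [])]
      rw [pvF_dedup (pvStream rest r) [] _ (by intro k hk; cases hk)]
      rw [← pvF_map (fun v => v + 1) (pvStream rest r)]
      apply pvF_congr
      intro k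
      rw [← hs0]
      simp

-- ===== VERDICT (by name: the statement is the Claim_ definition above) =====
theorem findpairflajs_spec : Claim_equal_findpairflajs := by
  intro rows r _ _
  unfold Spec_findpairflajs
  rw [pvA_eq, pvB_eq]
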